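-- pv_equiv track=rewrite | github.com/Haiwei1027/aoc-2023 | day12/solver.py | satisfiable
-- ===== SOURCE A (Python) =====
-- def satisfiable(springs, groups):
--     damaged = [s for s in springs if s[1] != '.']
--     damaged_cursor = 0
--     for require in groups:
--         if damaged_cursor >= len(damaged):
--             return True
--         ele = damaged[damaged_cursor]
--         if ele[1] == '?':
--             return True
--         if ele[0] > require:
--            return False
--         damaged_cursor += 1
--     return True
-- ===== SOURCE B (Python) =====
-- def satisfiable(springs, groups):
--     pairs = list(zip((s for s in springs if s[1] != '.'), groups))
--     res = True
--     for (count, char), g in reversed(pairs):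
--         res = True if char == '?' else (False if count > g else res)
--     return res
-- ===== Notes on version B (the rewrite author's own statement) =====
-- stated objective: alternative
-- what changed: Replaces A's cursor-indexed early-return loop with a declarative pipeline: zip the non-'.' springs with groups and compute the verdict by a backwards right-fold over the zipped pairs ('?' forces True, an over-large count forces False, otherwise keep the tail's verdict), with no cursor and no early returns.
import Mathlib
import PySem

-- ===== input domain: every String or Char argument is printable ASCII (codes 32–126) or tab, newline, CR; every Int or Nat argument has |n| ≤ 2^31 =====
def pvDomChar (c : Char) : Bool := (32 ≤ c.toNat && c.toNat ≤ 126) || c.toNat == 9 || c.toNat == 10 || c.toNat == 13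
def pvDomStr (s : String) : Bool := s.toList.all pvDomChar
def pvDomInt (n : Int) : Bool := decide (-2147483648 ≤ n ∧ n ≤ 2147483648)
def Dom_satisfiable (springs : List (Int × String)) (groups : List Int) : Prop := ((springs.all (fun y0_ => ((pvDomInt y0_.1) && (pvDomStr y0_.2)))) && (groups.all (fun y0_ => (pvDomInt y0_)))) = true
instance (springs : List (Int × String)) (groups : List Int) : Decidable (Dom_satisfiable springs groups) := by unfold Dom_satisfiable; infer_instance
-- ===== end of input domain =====

-- B replaces A's cursor-and-early-return loop by zipping the non-'.' springs with groups and
-- right-folding the zipped pairs back-to-front (alternative decomposition, same cost).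
-- ===== PORT A =====
-- the 'for require in groups' loop with the cursor into the filtered list
def satLoopA (damaged : List (Int × String)) (cursor : Nat) : List Int → Bool
  | [] => true
  | require :: rest =>
    if cursor ≥ damaged.length then true
    else
      match damaged[cursor]? with
      | none => true   -- unreachable: cursor < damaged.length
      | some ele =>
        if ele.2 == "?" then true
        else if ele.1 > require then false
        else satLoopA damaged (cursor + 1) rest

def satisfiable (springs : List (Int × String)) (groups : List Int) : Bool :=
  satLoopA (springs.filter (fun s => s.2 != ".")) 0 groups

-- ===== PORT B =====
-- the 'for … in reversed(pairs)' accumulator loop is exactly a right fold over the pairs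
def satFold (pairs : List ((Int × String) × Int)) : Bool :=
  pairs.foldr (fun p res => if p.1.2 == "?" then true else if p.1.1 > p.2 then false else res) true

def satisfiable_alt (springs : List (Int × String)) (groups : List Int) : Bool :=
  satFold ((springs.filter (fun s => s.2 != ".")).zip groups)

-- ===== PRECONDITION & SPEC =====
def Spec_satisfiable (springs : List (Int × String)) (groups : List Int) (out : Bool) : Prop := out = satisfiable_alt springs groups
instance (springs : List (Int × String)) (groups : List Int) (out : Bool) : Decidable (Spec_satisfiable springs groups out) := by unfold Spec_satisfiable; infer_instance

-- ===== CLAIM (what is proved, stated in full; the proofs are below) =====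
def Claim_equal_satisfiable : Prop := ∀ (springs : List (Int × String)) (groups : List Int), Dom_satisfiable springs groups → Spec_satisfiable springs groups (satisfiable springs groups)

-- ===== LEMMAS AND PROOFS =====

theorem satLoopA_eq_fold (groups : List Int) :
    ∀ (damaged : List (Int × String)) (cursor : Nat),
      satLoopA damaged cursor groups = satFold ((damaged.drop cursor).zip groups) := by
  induction groups with
  | nil => intro damaged cursor; simp [satLoopA, satFold]
  | cons g gs ih =>
    intro damaged cursor
    by_cases h : cursor ≥ damaged.length
    · have hd : damaged.drop cursor = [] := List.drop_eq_nil_of_le h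
      simp [satLoopA, h, hd, satFold]
    · have hlt : cursor < damaged.length := by omega
      have hd : damaged.drop cursor = damaged[cursor] :: damaged.drop (cursor + 1) :=
        List.drop_eq_getElem_cons hlt
      have hget : damaged[cursor]? = some damaged[cursor] := List.getElem?_eq_getElem hlt
      simp only [satLoopA, hget, hd, if_neg h, List.zip_cons_cons, satFold, List.foldr_cons]
      split
      · rfl
      · split
        · rfl
        · exact ih damaged (cursor + 1)

-- ===== VERDICT (by name: the statement is the Claim_ definition above) =====
theorem satisfiable_spec : Claim_equal_satisfiable := by
  intro springs groups _
  unfold Spec_satisfiable satisfiable satisfiable_alt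
  rw [satLoopA_eq_fold, List.drop_zero]
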